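-- pv_equiv track=rewrite | github.com/noahpieta/IPyRSSA | Structure.py | dot_to_alignDot
-- ===== SOURCE A (Python) =====
-- def dot_to_alignDot(dot, aligned_seq):
--     """
--     dot                     -- Dotbracket structure
--     aligned_seq             -- Aligned sequence  ATCGACG-ATAGCT-AATGCTAGC
--
--     Convert dotbracket structure to aligned dotbracket structure
--     """
--     assert len(dot) == len(aligned_seq) - aligned_seq.count('-')
--
--     alignedSS = ""
--     i = 0
--     for base in list(aligned_seq):
--         if base == '-':
--             alignedSS +=  '-'
--         else:
--             alignedSS += dot[i]
--             i += 1
--     return alignedSS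
-- ===== SOURCE B (Python) =====
-- def dot_to_alignDot(dot, aligned_seq):
--     """
--     dot                     -- Dotbracket structure
--     aligned_seq             -- Aligned sequence  ATCGACG-ATAGCT-AATGCTAGC
--
--     Convert dotbracket structure to aligned dotbracket structure
--     """
--     assert len(dot) == len(aligned_seq) - aligned_seq.count('-')
--
--     gap_positions = [i for i, base in enumerate(aligned_seq) if base == '-']
--     result = list(dot)
--     for pos in gap_positions:
--         result.insert(pos, '-')
--     return ''.join(result)
-- ===== Notes on version B (the rewrite author's own statement) =====
-- stated objective: alternative
-- what changed: Instead of scanning aligned_seq threading a cursor into dot and appending char by char, B computes the gap indices first and splices '-' into a copied list of dot at those increasing positions.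
import Mathlib
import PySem

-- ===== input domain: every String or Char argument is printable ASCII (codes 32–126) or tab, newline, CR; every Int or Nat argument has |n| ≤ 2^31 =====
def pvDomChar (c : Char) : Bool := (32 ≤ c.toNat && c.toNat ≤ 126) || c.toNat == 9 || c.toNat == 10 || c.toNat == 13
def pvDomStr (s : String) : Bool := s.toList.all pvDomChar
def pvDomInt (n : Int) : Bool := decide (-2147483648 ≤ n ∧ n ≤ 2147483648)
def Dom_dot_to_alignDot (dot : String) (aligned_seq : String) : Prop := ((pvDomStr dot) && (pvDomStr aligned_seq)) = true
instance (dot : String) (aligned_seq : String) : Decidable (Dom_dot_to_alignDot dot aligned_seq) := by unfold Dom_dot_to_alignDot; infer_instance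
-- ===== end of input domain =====

-- B splices '-' into a copy of dot at the precomputed gap indices instead of scanning
-- aligned_seq with a cursor into dot; same cost class, different decomposition.

-- ===== PORT A =====
-- A scans aligned_seq; on '-' appends '-', otherwise appends dot[i] and bumps i.
-- (under Pre_ the index i is always in range; .getD '?' is never reached there)
def dot_to_alignDot (dot : String) (aligned_seq : String) : String :=
  let st := aligned_seq.toList.foldl
    (fun (st : List Char × Int) base =>
      if base = '-' then (st.1 ++ ['-'], st.2)
      else (st.1 ++ [(PySem.List.pyGet? dot.toList st.2).getD '?'], st.2 + 1))
    ([], 0)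
  String.ofList st.1

-- ===== PORT B =====
-- gap indices first, then result = list(dot) with '-' inserted at each gap position
def dot_to_alignDot_alt (dot : String) (aligned_seq : String) : String :=
  let gap_positions :=
    ((PySem.List.enumerate aligned_seq.toList).filter (fun p => p.2 == '-')).map Prod.fst
  String.ofList (gap_positions.foldl (fun res pos => PySem.List.insert res pos '-') dot.toList)

-- ===== PRECONDITION & SPEC =====
-- Pre_ is exactly A's assert: len(dot) == len(aligned_seq) - aligned_seq.count('-');
-- on other inputs A raises AssertionError (or IndexError), returning nothing.
def Pre_dot_to_alignDot (dot : String) (aligned_seq : String) : Prop :=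
  dot.toList.length = aligned_seq.toList.length - aligned_seq.toList.count '-'

instance (dot : String) (aligned_seq : String) : Decidable (Pre_dot_to_alignDot dot aligned_seq) := by
  unfold Pre_dot_to_alignDot; infer_instance

def pvWitness_dot_to_alignDot : String × String := ("(.)", "AT-C")

def Spec_dot_to_alignDot (dot : String) (aligned_seq : String) (out : String) : Prop :=
  out = dot_to_alignDot_alt dot aligned_seq
instance (dot : String) (aligned_seq : String) (out : String) : Decidable (Spec_dot_to_alignDot dot aligned_seq out) := by unfold Spec_dot_to_alignDot; infer_instance

-- ===== CLAIM (what is proved, stated in full; the proofs are below) =====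
def Claim_equal_dot_to_alignDot : Prop := ∀ (dot : String) (aligned_seq : String), Dom_dot_to_alignDot dot aligned_seq → Pre_dot_to_alignDot dot aligned_seq → Spec_dot_to_alignDot dot aligned_seq (dot_to_alignDot dot aligned_seq)

-- ===== LEMMAS AND PROOFS =====

-- the canonical interleaving both programs compute under Pre_
def pvMerge : List Char → List Char → List Char
  | [], _ => []
  | b :: s, d => if b = '-' then '-' :: pvMerge s d
                 else d.headD '?' :: pvMerge s d.tail

-- number of non-gap characters
def pvNG (s : List Char) : Nat := s.countP (fun b => b ≠ '-')

theorem pvNG_cons (b : Char) (s : List Char) :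
    pvNG (b :: s) = if b = '-' then pvNG s else pvNG s + 1 := by
  simp [pvNG, List.countP_cons]; split_ifs <;> simp_all

-- ---- A side ----
def pvGA (d : List Char) : List Char → Int → List Char
  | [], _ => []
  | b :: s, i => if b = '-' then '-' :: pvGA d s i
                 else (PySem.List.pyGet? d i).getD '?' :: pvGA d s (i + 1)

theorem pvFoldA (d : List Char) (s : List Char) :
    ∀ (acc : List Char) (i : Int),
      (s.foldl (fun (st : List Char × Int) base =>
        if base = '-' then (st.1 ++ ['-'], st.2)
        else (st.1 ++ [(PySem.List.pyGet? d st.2).getD '?'], st.2 + 1)) (acc, i)).1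
      = acc ++ pvGA d s i := by
  induction s with
  | nil => intro acc i; simp [pvGA]
  | cons b s ih =>
    intro acc i
    rw [List.foldl_cons]
    by_cases hb : b = '-'
    · rw [if_pos hb, ih (acc ++ ['-']) i]
      simp [pvGA, hb]
    · rw [if_neg hb, ih _ (i + 1)]
      simp [pvGA, hb]

theorem pvGA_eq_merge (d : List Char) (s : List Char) :
    ∀ (i : Nat), i + pvNG s ≤ d.length → pvGA d s (i : Int) = pvMerge s (d.drop i) := by
  induction s with
  | nil => intro i _; simp [pvGA, pvMerge]
  | cons b s ih =>
    intro i hle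
    rw [pvNG_cons] at hle
    by_cases hb : b = '-'
    · rw [if_pos hb] at hle
      show (if b = '-' then '-' :: pvGA d s (i : Int)
            else (PySem.List.pyGet? d (i : Int)).getD '?' :: pvGA d s ((i : Int) + 1))
           = pvMerge (b :: s) (d.drop i)
      rw [if_pos hb]
      show _ = (if b = '-' then '-' :: pvMerge s (d.drop i)
                else (d.drop i).headD '?' :: pvMerge s (d.drop i).tail)
      rw [if_pos hb, ih i hle]
    · rw [if_neg hb] at hle
      have hi : i < d.length := by omega
      have hdrop : d.drop i = d[i] :: d.drop (i + 1) := List.drop_eq_getElem_cons hi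
      show (if b = '-' then '-' :: pvGA d s (i : Int)
            else (PySem.List.pyGet? d (i : Int)).getD '?' :: pvGA d s ((i : Int) + 1))
           = pvMerge (b :: s) (d.drop i)
      rw [if_neg hb]
      show _ = (if b = '-' then '-' :: pvMerge s (d.drop i)
                else (d.drop i).headD '?' :: pvMerge s (d.drop i).tail)
      rw [if_neg hb, hdrop]
      simp only [List.headD_cons, List.tail_cons]
      rw [PySem.List.pyGet?_natCast, List.getElem?_eq_getElem hi]
      simp only [Option.getD_some]
      have := ih (i + 1) (by omega)
      push_cast at this
      rw [this]

-- ---- B side ----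
def pvGaps (s : List Char) (n : Int) : List Int :=
  ((PySem.List.enumerate s n).filter (fun p => p.2 == '-')).map Prod.fst

theorem pvGaps_cons (b : Char) (s : List Char) (n : Int) :
    pvGaps (b :: s) n = if b = '-' then n :: pvGaps s (n + 1) else pvGaps s (n + 1) := by
  simp [pvGaps, PySem.List.enumerate_cons]
  split_ifs with h <;> simp [h]

theorem pvGaps_shift (s : List Char) : ∀ n : Int, pvGaps s (n + 1) = (pvGaps s n).map (· + 1) := by
  induction s with
  | nil => intro n; simp [pvGaps, PySem.List.enumerate_nil]
  | cons b s ih =>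
    intro n
    rw [pvGaps_cons, pvGaps_cons]
    split_ifs <;> simp [ih (n + 1), ih n]

theorem pvGaps_nonneg (s : List Char) : ∀ (n : Int), 0 ≤ n → ∀ p ∈ pvGaps s n, n ≤ p := by
  induction s with
  | nil => intro n _ p hp; simp [pvGaps, PySem.List.enumerate_nil] at hp
  | cons b s ih =>
    intro n hn p hp
    rw [pvGaps_cons] at hp
    split_ifs at hp with hb
    · rcases List.mem_cons.mp hp with h | h
      · omega
      · have := ih (n + 1) (by omega) p h; omega
    · have := ih (n + 1) (by omega) p hp; omega

theorem pvInsCons (c : Char) (d : List Char) (p : Int) (v : Char) (hp : 1 ≤ p) :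
    PySem.List.insert (c :: d) p v = c :: PySem.List.insert d (p - 1) v := by
  simp only [PySem.List.insert, PySem.List.sliceIndices]
  norm_num
  have h1 : ¬ (p < 0) := by omega
  have h3 : ¬ (p < 1) := by omega
  simp only [if_neg h1, if_neg h3]
  have hk : (min p ((d.length : Int) + 1)).toNat = (min (p - 1) (d.length : Int)).toNat + 1 := by
    omega
  rw [hk]
  simp [List.take_succ_cons, List.drop_succ_cons]

theorem pvFoldlInsCons (ps : List Int) :
    ∀ (d : List Char) (c : Char), (∀ p ∈ ps, 1 ≤ p) →
      ps.foldl (fun res pos => PySem.List.insert res pos '-') (c :: d)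
      = c :: (ps.map (· - 1)).foldl (fun res pos => PySem.List.insert res pos '-') d := by
  induction ps with
  | nil => intro d c _; simp
  | cons p ps ih =>
    intro d c h
    simp only [List.foldl_cons, List.map_cons]
    rw [pvInsCons c d p '-' (h p (List.mem_cons_self ..)),
        ih _ c (fun q hq => h q (List.mem_cons_of_mem _ hq))]

theorem pvB_main (s : List Char) : ∀ (d : List Char), d.length = pvNG s →
    (pvGaps s 0).foldl (fun res pos => PySem.List.insert res pos '-') d = pvMerge s d := by
  induction s with
  | nil =>
    intro d hd
    have : d = [] := List.eq_nil_of_length_eq_zero (by simpa [pvNG] using hd)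
    simp [this, pvGaps, PySem.List.enumerate_nil, pvMerge]
  | cons b s ih =>
    intro d hd
    rw [pvNG_cons] at hd
    rw [pvGaps_cons]
    have hshift := pvGaps_shift s 0
    by_cases hb : b = '-'
    · subst hb
      rw [if_pos rfl] at hd
      rw [if_pos rfl]
      simp only [List.foldl_cons, PySem.List.insert_zero]
      rw [hshift, pvFoldlInsCons _ _ _ (by
        intro p hp
        rcases List.mem_map.mp hp with ⟨q, hq, rfl⟩
        have := pvGaps_nonneg s 0 le_rfl q hq; omega)]
      simp only [List.map_map]
      rw [show ((fun x => x - 1) ∘ (fun x => x + 1) : Int → Int) = id from funext (fun x => by simp),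
          List.map_id, ih d hd]
      simp [pvMerge]
    · simp only [if_neg hb] at hd ⊢
      obtain ⟨x, d', rfl⟩ : ∃ x d', d = x :: d' := by
        cases d with
        | nil => simp at hd
        | cons x d' => exact ⟨x, d', rfl⟩
      rw [hshift, pvFoldlInsCons _ _ _ (by
        intro p hp
        rcases List.mem_map.mp hp with ⟨q, hq, rfl⟩
        have := pvGaps_nonneg s 0 le_rfl q hq; omega)]
      rw [List.map_map,
          show ((fun x => x - 1) ∘ (fun x => x + 1) : Int → Int) = id from funext (fun x => by simp),
          List.map_id, ih d' (by simp at hd; omega)]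
      simp [pvMerge, hb]

theorem pvCount_add_NG (s : List Char) : pvNG s + s.count '-' = s.length := by
  induction s with
  | nil => simp [pvNG]
  | cons b s ih =>
    rw [pvNG_cons, List.count_cons]
    split_ifs with h <;> simp [h] at * <;> omega

-- ===== VERDICT (by name: the statement is the Claim_ definition above) =====
theorem dot_to_alignDot_spec : Claim_equal_dot_to_alignDot := by
  intro dot aligned_seq _ hpre
  unfold Spec_dot_to_alignDot dot_to_alignDot dot_to_alignDot_alt
  have hcle : aligned_seq.toList.count '-' ≤ aligned_seq.toList.length := List.count_le_length
  have hd : dot.toList.length = pvNG aligned_seq.toList := by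
    have := pvCount_add_NG aligned_seq.toList
    unfold Pre_dot_to_alignDot at hpre
    omega
  simp only []
  rw [pvFoldA dot.toList aligned_seq.toList [] 0]
  have hA : pvGA dot.toList aligned_seq.toList ((0 : Nat) : Int)
      = pvMerge aligned_seq.toList (dot.toList.drop 0) :=
    pvGA_eq_merge dot.toList aligned_seq.toList 0 (by omega)
  simp only [List.drop_zero, Nat.cast_zero] at hA
  rw [List.nil_append, hA]
  rw [show (((PySem.List.enumerate aligned_seq.toList).filter (fun p => p.2 == '-')).map Prod.fst)
        = pvGaps aligned_seq.toList 0 from rfl]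
  rw [pvB_main aligned_seq.toList dot.toList hd]
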